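-- pv_equiv track=rewrite | github.com/zoharno/chamon_decoder | chamdec_verification.py | chamon_full_logicals
-- ===== SOURCE A (Python) =====
-- def chamon_logicals(px, numqubits):
--     zlogical1 = [0] * numqubits
--     zlogical2 = [0] * numqubits
--     zlogical3 = [0] * numqubits
--     zlogical4 = [0] * numqubits
--     xlogical1 = [0] * numqubits
--     xlogical2 = [0] * numqubits
--     xlogical3 = [0] * numqubits
--     xlogical4 = [0] * numqubits
--     numq_layer = 2 * px * px
--     for i in range(numqubits):
--         if i < numq_layer:
--             if (i // px) % 2 == 0:
--                 zlogical1[i] = 1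
--             else:
--                 zlogical2[i] = 1
--         elif i < 2*numq_layer:
--             if (i // px) % 2 == 0:
--                 zlogical3[i] = 1
--             else:
--                 zlogical4[i] = 1
--         if i % (2*px) == 0 and (i // numq_layer) % 2 == 0:
--             xlogical1[i] = 1
--         elif i % (2*px) == 0 and (i // numq_layer) % 2 == 1:
--             xlogical2[i] = 1
--         elif i % (2*px) == px and (i // numq_layer) % 2 == 0:
--             xlogical3[i] = 1
--         elif i % (2*px) == px and (i // numq_layer) % 2 == 1:
--             xlogical4[i] = 1
--
--     return zlogical1, zlogical2, zlogical3, zlogical4, xlogical1, xlogical2, xlogical3, xlogical4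
--
-- def chamon_full_logicals(px, numqubits):
--     logicals = chamon_logicals(px, numqubits)
--     zeros = [0]*numqubits
--     full_logicals = []
--     counter = 0
--     for logical in logicals:
--         if counter < 4:
--             newl = zeros + logical
--         else:
--             newl = logical + zeros
--         full_logicals.append(newl)
--         counter += 1
--     return full_logicals
-- ===== SOURCE B (Python) =====
-- def chamon_full_logicals(px, numqubits):
--     n = numqubits if numqubits > 0 else 0
--     if n == 0:
--         return [[] for _ in range(8)]
--     nl = 2 * px * px
--
--     def z_vec(start, stop):
--         # blocks of px ones starting at start, start+2*px, ... below stop (one layer)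
--         v = [0] * (2 * n)
--         for b in range(start, min(stop, n), 2 * px):
--             for i in range(b, min(b + px, n)):
--                 v[n + i] = 1
--         return v
--
--     def x_vec(layer_start, off):
--         # ones at off, off+2*px, ... within every second layer, starting at layer_start
--         v = [0] * (2 * n)
--         for base in range(layer_start, n, 2 * nl):
--             for i in range(base + off, min(base + nl, n), 2 * px):
--                 v[i] = 1
--         return v
--
--     return [z_vec(0, nl), z_vec(px, nl), z_vec(nl, 2 * nl), z_vec(nl + px, 2 * nl),
--             x_vec(0, 0), x_vec(nl, 0), x_vec(0, px), x_vec(nl, px)]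
-- ===== Notes on version B (the rewrite author's own statement) =====
-- stated objective: faster
-- what changed: Instead of one pass over all qubit indices testing div/mod branch conditions at every index and then concatenating zero blocks, B builds each of the 8 padded vectors directly, writing 1s only at the positions given by stepped ranges (blocks of px for the z-logicals, strides of 2*px within alternating layers for the x-logicals), so per-index division/modulo tests disappear.
import Mathlib
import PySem

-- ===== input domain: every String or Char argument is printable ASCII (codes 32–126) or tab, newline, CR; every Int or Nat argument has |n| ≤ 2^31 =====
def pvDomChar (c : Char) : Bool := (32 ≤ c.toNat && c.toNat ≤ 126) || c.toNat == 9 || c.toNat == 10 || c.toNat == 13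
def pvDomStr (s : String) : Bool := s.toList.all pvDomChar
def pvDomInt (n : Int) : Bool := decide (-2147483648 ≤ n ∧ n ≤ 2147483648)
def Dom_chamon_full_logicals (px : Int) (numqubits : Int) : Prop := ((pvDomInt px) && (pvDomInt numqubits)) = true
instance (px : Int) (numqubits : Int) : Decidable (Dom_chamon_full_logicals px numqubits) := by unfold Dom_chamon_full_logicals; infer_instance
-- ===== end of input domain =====

-- B builds each padded logical vector by writing 1s only at the positions given by stepped
-- ranges (block/stride structure of the Chamon logicals) instead of testing every index.


-- ===== PORT A =====

def chamonState : Type :=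
  List Int × List Int × List Int × List Int × List Int × List Int × List Int × List Int

def chamonStepA (px nl : Int) (st : chamonState) (i : Int) : chamonState :=
  match st with
  | (z1, z2, z3, z4, x1, x2, x3, x4) =>
    let zs :=
      if i < nl then
        if PySem.Int.mod (PySem.Int.floordiv i px) 2 = 0 then
          (PySem.List.pySetD z1 i 1, z2, z3, z4)
        else
          (z1, PySem.List.pySetD z2 i 1, z3, z4)
      else if i < 2 * nl then
        if PySem.Int.mod (PySem.Int.floordiv i px) 2 = 0 then
          (z1, z2, PySem.List.pySetD z3 i 1, z4)
        else
          (z1, z2, z3, PySem.List.pySetD z4 i 1)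
      else (z1, z2, z3, z4)
    let xs :=
      if PySem.Int.mod i (2 * px) = 0 ∧ PySem.Int.mod (PySem.Int.floordiv i nl) 2 = 0 then
        (PySem.List.pySetD x1 i 1, x2, x3, x4)
      else if PySem.Int.mod i (2 * px) = 0 ∧ PySem.Int.mod (PySem.Int.floordiv i nl) 2 = 1 then
        (x1, PySem.List.pySetD x2 i 1, x3, x4)
      else if PySem.Int.mod i (2 * px) = px ∧ PySem.Int.mod (PySem.Int.floordiv i nl) 2 = 0 then
        (x1, x2, PySem.List.pySetD x3 i 1, x4)
      else if PySem.Int.mod i (2 * px) = px ∧ PySem.Int.mod (PySem.Int.floordiv i nl) 2 = 1 then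
        (x1, x2, x3, PySem.List.pySetD x4 i 1)
      else (x1, x2, x3, x4)
    (zs.1, zs.2.1, zs.2.2.1, zs.2.2.2, xs.1, xs.2.1, xs.2.2.1, xs.2.2.2)

def chamon_logicals (px : Int) (numqubits : Int) : chamonState :=
  let zero : List Int := PySem.List.pyRepeat [0] numqubits
  let nl : Int := 2 * px * px
  (PySem.List.pyRange 0 numqubits 1).foldl (chamonStepA px nl)
    (zero, zero, zero, zero, zero, zero, zero, zero)

def chamon_full_logicals (px : Int) (numqubits : Int) : List (List Int) :=
  let l := chamon_logicals px numqubits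
  let logicals : List (List Int) :=
    [l.1, l.2.1, l.2.2.1, l.2.2.2.1, l.2.2.2.2.1, l.2.2.2.2.2.1, l.2.2.2.2.2.2.1, l.2.2.2.2.2.2.2]
  let zeros : List Int := PySem.List.pyRepeat [0] numqubits
  (logicals.foldl
    (fun (st : List (List Int) × Int) logical =>
      let newl := if st.2 < 4 then zeros ++ logical else logical ++ zeros
      (st.1 ++ [newl], st.2 + 1))
    ([], 0)).1

-- ===== PORT B =====

-- z-logical: blocks of px ones at start, start+2*px, … below stop, written into the z half.
def chamonZVec (px n : Int) (start stop : Int) : List Int :=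
  (PySem.List.pyRange start (min stop n) (2 * px)).foldl
    (fun v b =>
      (PySem.List.pyRange b (min (b + px) n) 1).foldl
        (fun v i => PySem.List.pySetD v (n + i) 1) v)
    (List.replicate (2 * n).toNat 0)

-- x-logical: ones at offset off, off+2*px, … within every second layer, written into the x half.
def chamonXVec (px n nl : Int) (layerStart off : Int) : List Int :=
  (PySem.List.pyRange layerStart n (2 * nl)).foldl
    (fun v base =>
      (PySem.List.pyRange (base + off) (min (base + nl) n) (2 * px)).foldl
        (fun v i => PySem.List.pySetD v i 1) v)
    (List.replicate (2 * n).toNat 0)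

def chamon_full_logicals_alt (px : Int) (numqubits : Int) : List (List Int) :=
  let n : Int := if numqubits > 0 then numqubits else 0
  if n = 0 then [[], [], [], [], [], [], [], []]
  else
    let nl : Int := 2 * px * px
    [chamonZVec px n 0 nl, chamonZVec px n px nl,
     chamonZVec px n nl (2 * nl), chamonZVec px n (nl + px) (2 * nl),
     chamonXVec px n nl 0 0, chamonXVec px n nl nl 0,
     chamonXVec px n nl 0 px, chamonXVec px n nl nl px]

-- ===== PRECONDITION & SPEC =====
-- Pre_ excludes nonpositive px together with positive numqubits: there px = 0 makes A raise
-- ZeroDivisionError, and a negative px (a malformed code distance) makes A return an accidental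
-- pattern of Python's sign-of-divisor floor division that B's positive-step ranges do not produce.
def Pre_chamon_full_logicals (px : Int) (numqubits : Int) : Prop := 1 ≤ px ∨ numqubits ≤ 0
instance (px : Int) (numqubits : Int) : Decidable (Pre_chamon_full_logicals px numqubits) := by
  unfold Pre_chamon_full_logicals; infer_instance
def pvWitness_chamon_full_logicals : Int × Int := (2, 20)

def Spec_chamon_full_logicals (px : Int) (numqubits : Int) (out : List (List Int)) : Prop :=
  out = chamon_full_logicals_alt px numqubits
instance (px : Int) (numqubits : Int) (out : List (List Int)) :
    Decidable (Spec_chamon_full_logicals px numqubits out) := by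
  unfold Spec_chamon_full_logicals; infer_instance

-- ===== CLAIM (what is proved, stated in full; the proofs are below) =====
def Claim_equal_chamon_full_logicals : Prop :=
  ∀ (px : Int) (numqubits : Int), Dom_chamon_full_logicals px numqubits →
    Pre_chamon_full_logicals px numqubits →
    Spec_chamon_full_logicals px numqubits (chamon_full_logicals px numqubits)

-- ===== LEMMAS AND PROOFS =====
-- infrastructure lemmas
theorem pv_foldl_condset (c : Int → Prop) [DecidablePred c] (l : List Int) (v : List Int)
    (hl : ∀ i ∈ l, 0 ≤ i ∧ i < (v.length : Int)) (j : Nat) :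
    (l.foldl (fun w i => if c i then PySem.List.pySetD w i 1 else w) v)[j]? =
      if ((j : Int) ∈ l ∧ c (j : Int)) then some 1 else v[j]? := by
  induction l generalizing v with
  | nil => simp
  | cons a l ih =>
    have ha := hl a (by simp)
    have hw : (if c a then PySem.List.pySetD v a 1 else v).length = v.length := by
      split <;> simp [PySem.List.pySetD_of_nonneg _ _ ha.1]
    rw [List.foldl_cons, ih _ (by rw [hw]; intro i hi; exact hl i (by simp [hi]))]
    by_cases hj : (j : Int) ∈ l ∧ c (j : Int)
    · simp [hj]
    · simp only [if_neg hj]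
      by_cases hc : c a
      · simp only [if_pos hc, PySem.List.pySetD_of_nonneg _ _ ha.1, List.getElem?_set]
        by_cases he : (j : Int) = a
        · have : a.toNat = j := by omega
          simp [this, he, hc, show j < v.length by omega]
        · have : a.toNat ≠ j := by omega
          simp only [if_neg this]
          rw [if_neg]
          rintro ⟨h1, h2⟩
          rcases List.mem_cons.mp h1 with h | h
          · exact he h
          · exact hj ⟨h, h2⟩
      · simp only [if_neg hc]
        rw [if_neg]
        rintro ⟨h1, h2⟩
        rcases List.mem_cons.mp h1 with h | h
        · exact hc (h ▸ h2)
        · exact hj ⟨h, h2⟩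

theorem pv_foldl_gset (g : Int → Int) (l : List Int) (v : List Int)
    (hl : ∀ i ∈ l, 0 ≤ g i ∧ g i < (v.length : Int)) (j : Nat) :
    (l.foldl (fun w i => PySem.List.pySetD w (g i) 1) v)[j]? =
      if (∃ i ∈ l, g i = (j : Int)) then some 1 else v[j]? := by
  induction l generalizing v with
  | nil => simp
  | cons a l ih =>
    have ha := hl a (by simp)
    have hw : (PySem.List.pySetD v (g a) 1).length = v.length := by
      simp [PySem.List.pySetD_of_nonneg _ _ ha.1]
    rw [List.foldl_cons, ih _ (by rw [hw]; intro i hi; exact hl i (by simp [hi]))]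
    by_cases hj : ∃ i ∈ l, g i = (j : Int)
    · simp only [if_pos hj]
      rw [if_pos]
      obtain ⟨i, hi, hgi⟩ := hj
      exact ⟨i, by simp [hi], hgi⟩
    · simp only [if_neg hj, PySem.List.pySetD_of_nonneg _ _ ha.1, List.getElem?_set]
      by_cases he : (g a).toNat = j
      · have hga : g a = (j : Int) := by omega
        rw [if_pos (show ∃ i ∈ a :: l, g i = (j:Int) from ⟨a, by simp, hga⟩), if_pos he,
          if_pos (show (g a).toNat < v.length by omega)]
      · simp only [if_neg he]
        rw [if_neg]
        rintro ⟨i, hi, hgi⟩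
        rcases List.mem_cons.mp hi with h | h
        · subst h; exact he (by omega)
        · exact hj ⟨i, h, hgi⟩

theorem pv_foldl_nested (f : Int → List Int) (step : List Int → Int → List Int)
    (l : List Int) (v : List Int) :
    l.foldl (fun w b => (f b).foldl step w) v = (l.flatMap f).foldl step v := by
  induction l generalizing v with
  | nil => simp
  | cons a l ih => simp [List.foldl_append, ih]

theorem pv_foldl_condset_length (c : Int → Prop) [DecidablePred c] (l : List Int) (v : List Int)
    (hl : ∀ i ∈ l, 0 ≤ i) :
    (l.foldl (fun w i => if c i then PySem.List.pySetD w i 1 else w) v).length = v.length := by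
  induction l generalizing v with
  | nil => rfl
  | cons a l ih =>
    rw [List.foldl_cons, ih _ (fun i hi => hl i (by simp [hi]))]
    split
    · simp [PySem.List.pySetD_of_nonneg _ _ (hl a (by simp))]
    · rfl
-- the eight set-conditions of A's loop body (exact guards of the if/elif chains)
abbrev pvCz1 (px nl i : Int) : Prop := i < nl ∧ PySem.Int.mod (PySem.Int.floordiv i px) 2 = 0
abbrev pvCz2 (px nl i : Int) : Prop := i < nl ∧ ¬ PySem.Int.mod (PySem.Int.floordiv i px) 2 = 0
abbrev pvCz3 (px nl i : Int) : Prop :=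
  ¬ i < nl ∧ i < 2 * nl ∧ PySem.Int.mod (PySem.Int.floordiv i px) 2 = 0
abbrev pvCz4 (px nl i : Int) : Prop :=
  ¬ i < nl ∧ i < 2 * nl ∧ ¬ PySem.Int.mod (PySem.Int.floordiv i px) 2 = 0
abbrev pvCx1 (px nl i : Int) : Prop :=
  PySem.Int.mod i (2 * px) = 0 ∧ PySem.Int.mod (PySem.Int.floordiv i nl) 2 = 0
abbrev pvCx2 (px nl i : Int) : Prop :=
  ¬ pvCx1 px nl i ∧ (PySem.Int.mod i (2 * px) = 0 ∧ PySem.Int.mod (PySem.Int.floordiv i nl) 2 = 1)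
abbrev pvCx3 (px nl i : Int) : Prop :=
  ¬ pvCx1 px nl i ∧
  ¬ (PySem.Int.mod i (2 * px) = 0 ∧ PySem.Int.mod (PySem.Int.floordiv i nl) 2 = 1) ∧
  (PySem.Int.mod i (2 * px) = px ∧ PySem.Int.mod (PySem.Int.floordiv i nl) 2 = 0)
abbrev pvCx4 (px nl i : Int) : Prop :=
  ¬ pvCx1 px nl i ∧
  ¬ (PySem.Int.mod i (2 * px) = 0 ∧ PySem.Int.mod (PySem.Int.floordiv i nl) 2 = 1) ∧
  ¬ (PySem.Int.mod i (2 * px) = px ∧ PySem.Int.mod (PySem.Int.floordiv i nl) 2 = 0) ∧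
  (PySem.Int.mod i (2 * px) = px ∧ PySem.Int.mod (PySem.Int.floordiv i nl) 2 = 1)

def pvCondFold (c : Int → Prop) [DecidablePred c] (l : List Int) (v : List Int) : List Int :=
  l.foldl (fun w i => if c i then PySem.List.pySetD w i 1 else w) v

theorem pvZtree_eq (px nl a : Int) (z1 z2 z3 z4 : List Int) :
    (if a < nl then
        if PySem.Int.mod (PySem.Int.floordiv a px) 2 = 0 then
          (PySem.List.pySetD z1 a 1, z2, z3, z4)
        else (z1, PySem.List.pySetD z2 a 1, z3, z4)
      else if a < 2 * nl then
        if PySem.Int.mod (PySem.Int.floordiv a px) 2 = 0 then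
          (z1, z2, PySem.List.pySetD z3 a 1, z4)
        else (z1, z2, z3, PySem.List.pySetD z4 a 1)
      else (z1, z2, z3, z4)) =
      ((if pvCz1 px nl a then PySem.List.pySetD z1 a 1 else z1),
       (if pvCz2 px nl a then PySem.List.pySetD z2 a 1 else z2),
       (if pvCz3 px nl a then PySem.List.pySetD z3 a 1 else z3),
       (if pvCz4 px nl a then PySem.List.pySetD z4 a 1 else z4)) := by
  simp only [pvCz1, pvCz2, pvCz3, pvCz4]
  split_ifs <;> first | rfl | tauto

theorem pvXtree_eq (px nl a : Int) (x1 x2 x3 x4 : List Int) :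
    (if PySem.Int.mod a (2 * px) = 0 ∧ PySem.Int.mod (PySem.Int.floordiv a nl) 2 = 0 then
        (PySem.List.pySetD x1 a 1, x2, x3, x4)
      else if PySem.Int.mod a (2 * px) = 0 ∧ PySem.Int.mod (PySem.Int.floordiv a nl) 2 = 1 then
        (x1, PySem.List.pySetD x2 a 1, x3, x4)
      else if PySem.Int.mod a (2 * px) = px ∧ PySem.Int.mod (PySem.Int.floordiv a nl) 2 = 0 then
        (x1, x2, PySem.List.pySetD x3 a 1, x4)
      else if PySem.Int.mod a (2 * px) = px ∧ PySem.Int.mod (PySem.Int.floordiv a nl) 2 = 1 then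
        (x1, x2, x3, PySem.List.pySetD x4 a 1)
      else (x1, x2, x3, x4)) =
      ((if pvCx1 px nl a then PySem.List.pySetD x1 a 1 else x1),
       (if pvCx2 px nl a then PySem.List.pySetD x2 a 1 else x2),
       (if pvCx3 px nl a then PySem.List.pySetD x3 a 1 else x3),
       (if pvCx4 px nl a then PySem.List.pySetD x4 a 1 else x4)) := by
  simp only [pvCx1, pvCx2, pvCx3, pvCx4]
  split_ifs <;> first | rfl | tauto

theorem pvStepA_eq (px nl a : Int) (z1 z2 z3 z4 x1 x2 x3 x4 : List Int) :
    chamonStepA px nl (z1, z2, z3, z4, x1, x2, x3, x4) a =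
      ((if pvCz1 px nl a then PySem.List.pySetD z1 a 1 else z1),
       (if pvCz2 px nl a then PySem.List.pySetD z2 a 1 else z2),
       (if pvCz3 px nl a then PySem.List.pySetD z3 a 1 else z3),
       (if pvCz4 px nl a then PySem.List.pySetD z4 a 1 else z4),
       (if pvCx1 px nl a then PySem.List.pySetD x1 a 1 else x1),
       (if pvCx2 px nl a then PySem.List.pySetD x2 a 1 else x2),
       (if pvCx3 px nl a then PySem.List.pySetD x3 a 1 else x3),
       (if pvCx4 px nl a then PySem.List.pySetD x4 a 1 else x4)) := by
  simp only [chamonStepA]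
  rw [pvZtree_eq, pvXtree_eq]

theorem pvFoldA_split (px nl : Int) (l : List Int) (z1 z2 z3 z4 x1 x2 x3 x4 : List Int) :
    l.foldl (chamonStepA px nl) (z1, z2, z3, z4, x1, x2, x3, x4) =
      (pvCondFold (pvCz1 px nl) l z1, pvCondFold (pvCz2 px nl) l z2,
       pvCondFold (pvCz3 px nl) l z3, pvCondFold (pvCz4 px nl) l z4,
       pvCondFold (pvCx1 px nl) l x1, pvCondFold (pvCx2 px nl) l x2,
       pvCondFold (pvCx3 px nl) l x3, pvCondFold (pvCx4 px nl) l x4) := by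
  induction l generalizing z1 z2 z3 z4 x1 x2 x3 x4 with
  | nil => simp [pvCondFold]
  | cons a l ih => rw [List.foldl_cons, pvStepA_eq, ih]; simp [pvCondFold]
-- arithmetic helpers (Int, emod/ediv with positive divisors)
theorem pv_parity_iff (d i : Int) (hd : 0 < d) :
    (PySem.Int.mod (PySem.Int.floordiv i d) 2 = 0 ↔ i % (2 * d) < d) ∧
    (PySem.Int.mod (PySem.Int.floordiv i d) 2 = 1 ↔ d ≤ i % (2 * d)) := by
  have h2d : (0:Int) < 2 * d := by omega
  rw [PySem.Int.floordiv_eq_ediv_of_pos hd, PySem.Int.mod_eq_emod_of_pos (by norm_num)]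
  have hiq : i = i % (2 * d) + 2 * (i / (2 * d)) * d := by
    have := Int.mul_ediv_add_emod i (2 * d); ring_nf; ring_nf at this; omega
  set r := i % (2 * d) with hr
  have hr0 : 0 ≤ r := Int.emod_nonneg i (by omega)
  have hr2 : r < 2 * d := Int.emod_lt_of_pos i h2d
  have hdiv : i / d = r / d + 2 * (i / (2 * d)) := by
    have h := Int.add_mul_ediv_right r (2 * (i / (2 * d))) (show d ≠ 0 by omega)
    rw [show r + 2 * (i / (2 * d)) * d = i from by linarith [hiq]] at h
    exact h
  rw [hdiv, Int.add_mul_emod_self_left]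
  by_cases hlt : r < d
  · rw [Int.ediv_eq_zero_of_lt hr0 hlt]
    exact ⟨⟨fun _ => hlt, fun _ => by decide⟩,
           ⟨fun h => absurd h (by decide), fun h => absurd h (by omega)⟩⟩
  · have h1 : r / d = 1 := by
      have hle : 1 ≤ r / d := by
        rw [Int.le_ediv_iff_mul_le hd]; omega
      have hlt2 : r / d < 2 := by
        rw [Int.ediv_lt_iff_lt_mul hd]; omega
      omega
    rw [h1]
    exact ⟨⟨fun h => absurd h (by decide), fun h => absurd h hlt⟩,
           ⟨fun _ => by omega, fun _ => by decide⟩⟩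

theorem pv_emod_eq (m x s : Int) (hm : 0 < m) (h0 : 0 ≤ s) (h1 : s < m)
    (hd : m ∣ x - s) : x % m = s := by
  obtain ⟨k, hk⟩ := hd
  have hx : x = s + m * k := by omega
  rw [hx, Int.add_mul_emod_self_left]
  exact Int.emod_eq_of_lt h0 h1

theorem pv_le_of_dvd_gt (m a b : Int) (hm : 0 < m) (hd : m ∣ a - b) (h : b - m < a) :
    b ≤ a := by
  obtain ⟨k, hk⟩ := hd
  by_cases hk0 : 0 ≤ k
  · nlinarith
  · have hk1 : k ≤ -1 := by omega
    have : m * k ≤ m * (-1) := by nlinarith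
    omega

theorem pv_le_of_dvd_lt (m a b : Int) (hm : 0 < m) (hd : m ∣ a - b) (h : a < b + m) :
    a ≤ b := by
  obtain ⟨k, hk⟩ := hd
  by_cases hk0 : k ≤ 0
  · nlinarith
  · have hk1 : 1 ≤ k := by omega
    have : m * 1 ≤ m * k := by nlinarith
    omega

theorem pv_self_emod_le (m u : Int) (hm : 0 < m) (hu : 0 ≤ u) : u % m ≤ u := by
  have := Int.mul_ediv_add_emod u m
  have : 0 ≤ u / m := Int.ediv_nonneg hu (by omega)
  nlinarith [Int.mul_ediv_add_emod u m]
-- membership characterization for B's z-logical ranges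
theorem pvZ_iff (px N L o j' : Int) (hpx : 1 ≤ px) (hL : L = 0 ∨ L = 2 * px * px)
    (ho : o = 0 ∨ o = px) (hj0 : 0 ≤ j') (hjN : j' < N) :
    (∃ b ∈ PySem.List.pyRange (L + o) (min (L + 2 * px * px) N) (2 * px),
        j' ∈ PySem.List.pyRange b (min (b + px) N) 1)
    ↔ (L ≤ j' ∧ j' < L + 2 * px * px ∧ o ≤ j' % (2 * px) ∧ j' % (2 * px) < o + px) := by
  have h2px : (0:Int) < 2 * px := by omega
  have ho0 : 0 ≤ o := by rcases ho with h | h <;> omega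
  have hopx : o ≤ px := by rcases ho with h | h <;> omega
  have hdL : (2 * px) ∣ L := by
    rcases hL with h | h
    · exact h ▸ dvd_zero _
    · exact h ▸ ⟨px, by ring⟩
  constructor
  · rintro ⟨b, hb, hj⟩
    rw [PySem.List.mem_pyRange_iff_of_pos h2px] at hb
    rw [PySem.List.mem_pyRange_one] at hj
    obtain ⟨hb1, hb2, k, hk⟩ := hb
    obtain ⟨hj1, hj2⟩ := hj
    have hbLn : b < L + 2 * px * px := by
      have := min_le_left (L + 2 * px * px) N; omega
    have hjb : j' < b + px := by
      have := min_le_left (b + px) N; omega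
    have hk0 : 0 ≤ k := by nlinarith
    -- j' % (2*px) = o + (j' - b)
    have hmod : j' % (2 * px) = o + (j' - b) := by
      apply pv_emod_eq _ _ _ h2px (by omega) (by omega)
      have : j' - (o + (j' - b)) = L + 2 * px * k := by omega
      rw [this]
      exact dvd_add hdL ⟨k, rfl⟩
    -- b ≤ L + o + 2*px*px - 2*px
    have hble : b ≤ L + o + 2 * px * px - 2 * px := by
      apply pv_le_of_dvd_lt _ _ _ h2px
      · have : b - (L + o + 2 * px * px - 2 * px) = 2 * px * k - (2 * px * px - 2 * px) := by
          omega
        rw [this]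
        exact dvd_sub ⟨k, rfl⟩ ⟨px - 1, by ring⟩
      · omega
    refine ⟨by omega, by omega, by omega, by omega⟩
  · rintro ⟨h1, h2, h3, h4⟩
    have hm0 : 0 ≤ j' % (2 * px) := Int.emod_nonneg j' (by omega)
    have hm2 : j' % (2 * px) < 2 * px := Int.emod_lt_of_pos j' h2px
    have hqe : 2 * px * (j' / (2 * px)) + j' % (2 * px) = j' := Int.mul_ediv_add_emod j' (2 * px)
    refine ⟨j' - j' % (2 * px) + o, ?_, ?_⟩
    · rw [PySem.List.mem_pyRange_iff_of_pos h2px]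
      have hLle : L ≤ j' - j' % (2 * px) := by
        apply pv_le_of_dvd_gt _ _ _ h2px
        · have : j' - j' % (2 * px) - L = 2 * px * (j' / (2 * px)) - L := by omega
          rw [this]
          exact dvd_sub ⟨j' / (2 * px), rfl⟩ hdL
        · omega
      refine ⟨by omega, by omega, ?_⟩
      have : j' - j' % (2 * px) + o - (L + o) = 2 * px * (j' / (2 * px)) - L := by omega
      rw [this]
      exact dvd_sub ⟨j' / (2 * px), rfl⟩ hdL
    · rw [PySem.List.mem_pyRange_one]
      omega

-- membership characterization for B's x-logical ranges
theorem pvX_iff (px N S o j' : Int) (hpx : 1 ≤ px) (hS : S = 0 ∨ S = 2 * px * px)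
    (ho : o = 0 ∨ o = px) (hj0 : 0 ≤ j') (hjN : j' < N) :
    (∃ base ∈ PySem.List.pyRange S N (2 * (2 * px * px)),
        j' ∈ PySem.List.pyRange (base + o) (min (base + 2 * px * px) N) (2 * px))
    ↔ (j' % (2 * px) = o ∧ S ≤ j' % (2 * (2 * px * px)) ∧
        j' % (2 * (2 * px * px)) < S + 2 * px * px) := by
  have h2px : (0:Int) < 2 * px := by omega
  have hM : (0:Int) < 2 * (2 * px * px) := by nlinarith
  have ho0 : 0 ≤ o := by rcases ho with h | h <;> omega
  have hopx : o ≤ px := by rcases ho with h | h <;> omega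
  have hS0 : 0 ≤ S := by rcases hS with h | h <;> nlinarith
  have hSnl : S ≤ 2 * px * px := by rcases hS with h | h <;> nlinarith
  have hdS : (2 * px) ∣ S := by
    rcases hS with h | h
    · exact h ▸ dvd_zero _
    · exact h ▸ ⟨px, by ring⟩
  have hdM : (2 * px) ∣ (2 * (2 * px * px)) := ⟨2 * px, by ring⟩
  constructor
  · rintro ⟨base, hb, hj⟩
    rw [PySem.List.mem_pyRange_iff_of_pos hM] at hb
    rw [PySem.List.mem_pyRange_iff_of_pos h2px] at hj
    obtain ⟨hb1, hb2, hb3⟩ := hb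
    obtain ⟨hj1, hj2, hj3⟩ := hj
    have hjlt : j' < base + 2 * px * px := by
      have := min_le_left (base + 2 * px * px) N; omega
    have hmL : j' % (2 * (2 * px * px)) = S + (j' - base) := by
      apply pv_emod_eq _ _ _ hM (by omega) (by omega)
      have : j' - (S + (j' - base)) = base - S := by omega
      rw [this]
      exact hb3
    have hm2 : j' % (2 * px) = o := by
      apply pv_emod_eq _ _ _ h2px (by omega) (by omega)
      have : j' - o = (j' - (base + o)) + (base - S) + S := by omega
      rw [this]
      exact dvd_add (dvd_add hj3 (dvd_trans hdM hb3)) hdS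
    exact ⟨hm2, by omega, by omega⟩
  · rintro ⟨h1, h2, h3⟩
    have hm0 : 0 ≤ j' % (2 * (2 * px * px)) := Int.emod_nonneg j' (by omega)
    have hmM : j' % (2 * (2 * px * px)) < 2 * (2 * px * px) := Int.emod_lt_of_pos j' hM
    have hqe : 2 * (2 * px * px) * (j' / (2 * (2 * px * px))) + j' % (2 * (2 * px * px)) = j' :=
      Int.mul_ediv_add_emod j' (2 * (2 * px * px))
    have hq0 : 0 ≤ j' / (2 * (2 * px * px)) := Int.ediv_nonneg hj0 (by omega)
    have hprod : 0 ≤ 2 * (2 * px * px) * (j' / (2 * (2 * px * px))) :=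
      mul_nonneg (by omega) hq0
    -- u := j' % M - S satisfies u % (2*px) = o, hence o ≤ u
    have hu : (j' % (2 * (2 * px * px)) - S) % (2 * px) = o := by
      apply pv_emod_eq _ _ _ h2px ho0 (by omega)
      have : j' % (2 * (2 * px * px)) - S - o =
          (j' - o) - (2 * (2 * px * px) * (j' / (2 * (2 * px * px))) + S) := by omega
      rw [this]
      refine dvd_sub ?_ (dvd_add (dvd_trans hdM ⟨j' / (2 * (2 * px * px)), rfl⟩) hdS)
      have : j' - o = j' - j' % (2 * px) := by omega
      rw [this]
      exact ⟨j' / (2 * px), by have := Int.mul_ediv_add_emod j' (2 * px); omega⟩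
    have huo : o ≤ j' % (2 * (2 * px * px)) - S := by
      have := pv_self_emod_le (2 * px) (j' % (2 * (2 * px * px)) - S) h2px (by omega)
      omega
    refine ⟨j' - j' % (2 * (2 * px * px)) + S, ?_, ?_⟩
    · rw [PySem.List.mem_pyRange_iff_of_pos hM]
      refine ⟨by omega, by omega, ?_⟩
      have : j' - j' % (2 * (2 * px * px)) + S - S =
          2 * (2 * px * px) * (j' / (2 * (2 * px * px))) := by omega
      rw [this]
      exact ⟨j' / (2 * (2 * px * px)), rfl⟩
    · rw [PySem.List.mem_pyRange_iff_of_pos h2px]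
      refine ⟨by omega, by omega, ?_⟩
      have : j' - (j' - j' % (2 * (2 * px * px)) + S + o) =
          (j' % (2 * (2 * px * px)) - S) - o := by omega
      rw [this]
      have h2 := Int.mul_ediv_add_emod (j' % (2 * (2 * px * px)) - S) (2 * px)
      exact ⟨(j' % (2 * (2 * px * px)) - S) / (2 * px), by omega⟩
-- assembled z-component: A's padded conditional fold equals B's chamonZVec
theorem pvZcomp (px N L o : Int) (hpx : 1 ≤ px) (hN : 0 < N)
    (hL : L = 0 ∨ L = 2 * px * px) (ho : o = 0 ∨ o = px)
    (c : Int → Prop) [DecidablePred c]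
    (hc : ∀ i : Int, 0 ≤ i → i < N →
      (c i ↔ (L ≤ i ∧ i < L + 2 * px * px ∧ o ≤ i % (2 * px) ∧ i % (2 * px) < o + px)))
    (start stop : Int) (hstart : start = L + o) (hstop : stop = L + 2 * px * px) :
    List.replicate N.toNat (0:Int) ++ pvCondFold c (PySem.List.pyRange 0 N 1) (List.replicate N.toNat 0)
      = chamonZVec px N start stop := by
  subst hstart hstop
  have h2px : (0:Int) < 2 * px := by omega
  have ho0 : 0 ≤ o := by rcases ho with h | h <;> omega
  have hL0 : 0 ≤ L := by rcases hL with h | h <;> nlinarith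
  apply List.ext_getElem?
  intro j
  have hlhs : ∀ jj : Nat,
      (pvCondFold c (PySem.List.pyRange 0 N 1) (List.replicate N.toNat 0))[jj]? =
        if ((jj : Int) ∈ PySem.List.pyRange 0 N 1 ∧ c (jj : Int)) then some 1
        else (List.replicate N.toNat (0:Int))[jj]? := by
    intro jj
    unfold pvCondFold
    exact pv_foldl_condset c _ _
      (by intro i hi
          rw [PySem.List.mem_pyRange_one] at hi
          simp only [List.length_replicate]
          omega) jj
  have hrhs : (chamonZVec px N (L + o) (L + 2 * px * px))[j]? =
      if (∃ i ∈ (PySem.List.pyRange (L + o) (min (L + 2 * px * px) N) (2 * px)).flatMap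
            (fun b => PySem.List.pyRange b (min (b + px) N) 1), N + i = (j : Int))
      then some 1 else (List.replicate (2 * N).toNat (0:Int))[j]? := by
    unfold chamonZVec
    rw [pv_foldl_nested]
    rw [pv_foldl_gset (fun i => N + i)]
    intro i hi
    rw [List.mem_flatMap] at hi
    obtain ⟨b, hb, hib⟩ := hi
    rw [PySem.List.mem_pyRange_iff_of_pos h2px] at hb
    rw [PySem.List.mem_pyRange_one] at hib
    simp only [List.length_replicate]
    have h1 : (0:Int) ≤ b := by omega
    have h2 : i < N := by have := min_le_right (b + px) N; omega
    omega
  rw [hrhs]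
  by_cases hjN : (j : Int) < N
  · -- left half: a padding zero; no set position can equal j
    have hjN' : j < N.toNat := by omega
    rw [List.getElem?_append_left (by simpa using hjN')]
    rw [if_neg, List.getElem?_replicate, List.getElem?_replicate]
    · simp only [if_pos hjN', if_pos (show j < (2*N).toNat by omega)]
    · rintro ⟨i, hi, hNi⟩
      rw [List.mem_flatMap] at hi
      obtain ⟨b, hb, hib⟩ := hi
      rw [PySem.List.mem_pyRange_iff_of_pos h2px] at hb
      rw [PySem.List.mem_pyRange_one] at hib
      omega
  · have hjge : N.toNat ≤ j := by omega
    rw [List.getElem?_append_right (by simpa using hjge), List.length_replicate]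
    rw [hlhs (j - N.toNat)]
    have hcast : ((j - N.toNat : Nat) : Int) = (j : Int) - N := by omega
    rw [hcast]
    by_cases hj2 : (j : Int) < 2 * N
    · have hEx : (∃ i ∈ (PySem.List.pyRange (L + o) (min (L + 2 * px * px) N) (2 * px)).flatMap
            (fun b => PySem.List.pyRange b (min (b + px) N) 1), N + i = (j : Int)) ↔
          c ((j : Int) - N) := by
        rw [hc _ (by omega) (by omega),
          ← pvZ_iff px N L o ((j:Int) - N) hpx hL ho (by omega) (by omega)]
        constructor
        · rintro ⟨i, hi, hNi⟩
          rw [List.mem_flatMap] at hi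
          obtain ⟨b, hb, hib⟩ := hi
          exact ⟨b, hb, by rw [show (j:Int) - N = i by omega]; exact hib⟩
        · rintro ⟨b, hb, hjb⟩
          exact ⟨(j:Int) - N, List.mem_flatMap.mpr ⟨b, hb, hjb⟩, by omega⟩
      have hmem : ((j : Int) - N) ∈ PySem.List.pyRange 0 N 1 := by
        rw [PySem.List.mem_pyRange_one]; omega
      by_cases hcj : c ((j : Int) - N)
      · rw [if_pos ⟨hmem, hcj⟩, if_pos (hEx.mpr hcj)]
      · rw [if_neg (by rintro ⟨-, h⟩; exact hcj h), if_neg (fun h => hcj (hEx.mp h))]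
        rw [List.getElem?_replicate, List.getElem?_replicate]
        simp only [if_pos (show j - N.toNat < N.toNat by omega),
          if_pos (show j < (2*N).toNat by omega)]
    · -- j beyond both lists: none on both sides
      rw [if_neg, if_neg]
      · rw [List.getElem?_replicate, List.getElem?_replicate]
        simp only [if_neg (show ¬ j - N.toNat < N.toNat by omega),
          if_neg (show ¬ j < (2*N).toNat by omega)]
      · rintro ⟨i, hi, hNi⟩
        rw [List.mem_flatMap] at hi
        obtain ⟨b, hb, hib⟩ := hi
        rw [PySem.List.mem_pyRange_iff_of_pos h2px] at hb
        rw [PySem.List.mem_pyRange_one] at hib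
        have := min_le_right (b + px) N
        omega
      · rintro ⟨h, -⟩
        rw [PySem.List.mem_pyRange_one] at h
        omega

-- assembled x-component: A's conditional fold plus padding equals B's chamonXVec
theorem pvXcomp (px N S o : Int) (hpx : 1 ≤ px) (hN : 0 < N)
    (hS : S = 0 ∨ S = 2 * px * px) (ho : o = 0 ∨ o = px)
    (c : Int → Prop) [DecidablePred c]
    (hc : ∀ i : Int, 0 ≤ i → i < N →
      (c i ↔ (i % (2 * px) = o ∧ S ≤ i % (2 * (2 * px * px)) ∧
              i % (2 * (2 * px * px)) < S + 2 * px * px))) :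
    pvCondFold c (PySem.List.pyRange 0 N 1) (List.replicate N.toNat 0) ++ List.replicate N.toNat (0:Int)
      = chamonXVec px N (2 * px * px) S o := by
  have h2px : (0:Int) < 2 * px := by omega
  have hM : (0:Int) < 2 * (2 * px * px) := by nlinarith
  have ho0 : 0 ≤ o := by rcases ho with h | h <;> omega
  have hS0 : 0 ≤ S := by rcases hS with h | h <;> nlinarith
  apply List.ext_getElem?
  intro j
  have hlhs : ∀ jj : Nat,
      (pvCondFold c (PySem.List.pyRange 0 N 1) (List.replicate N.toNat 0))[jj]? =
        if ((jj : Int) ∈ PySem.List.pyRange 0 N 1 ∧ c (jj : Int)) then some 1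
        else (List.replicate N.toNat (0:Int))[jj]? := by
    intro jj
    unfold pvCondFold
    exact pv_foldl_condset c _ _
      (by intro i hi
          rw [PySem.List.mem_pyRange_one] at hi
          simp only [List.length_replicate]
          omega) jj
  have hlen : (pvCondFold c (PySem.List.pyRange 0 N 1) (List.replicate N.toNat 0)).length
      = N.toNat := by
    unfold pvCondFold
    rw [pv_foldl_condset_length c _ _
      (by intro i hi; rw [PySem.List.mem_pyRange_one] at hi; omega)]
    simp
  have hrhs : (chamonXVec px N (2 * px * px) S o)[j]? =
      if (∃ i ∈ (PySem.List.pyRange S N (2 * (2 * px * px))).flatMap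
            (fun base => PySem.List.pyRange (base + o) (min (base + 2 * px * px) N) (2 * px)),
          i = (j : Int))
      then some 1 else (List.replicate (2 * N).toNat (0:Int))[j]? := by
    unfold chamonXVec
    rw [pv_foldl_nested]
    have := pv_foldl_gset (fun i => i)
      ((PySem.List.pyRange S N (2 * (2 * px * px))).flatMap
        (fun base => PySem.List.pyRange (base + o) (min (base + 2 * px * px) N) (2 * px)))
      (List.replicate (2 * N).toNat (0:Int))
      (by intro i hi
          rw [List.mem_flatMap] at hi
          obtain ⟨b, hb, hib⟩ := hi
          rw [PySem.List.mem_pyRange_iff_of_pos hM] at hb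
          rw [PySem.List.mem_pyRange_iff_of_pos h2px] at hib
          simp only [List.length_replicate]
          have h2 : i < N := by have := min_le_right (b + 2 * px * px) N; omega
          omega) j
    simpa using this
  rw [hrhs]
  by_cases hjN : (j : Int) < N
  · have hjN' : j < N.toNat := by omega
    rw [List.getElem?_append_left (by omega : j < (pvCondFold c (PySem.List.pyRange 0 N 1) (List.replicate N.toNat 0)).length)]
    rw [hlhs j]
    have hmem : ((j : Int)) ∈ PySem.List.pyRange 0 N 1 := by
      rw [PySem.List.mem_pyRange_one]; omega
    have hEx : (∃ i ∈ (PySem.List.pyRange S N (2 * (2 * px * px))).flatMap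
          (fun base => PySem.List.pyRange (base + o) (min (base + 2 * px * px) N) (2 * px)),
        i = (j : Int)) ↔ c (j : Int) := by
      rw [hc _ (by omega) (by omega),
        ← pvX_iff px N S o (j : Int) hpx hS ho (by omega) (by omega)]
      constructor
      · rintro ⟨i, hi, rfl⟩
        rw [List.mem_flatMap] at hi
        exact hi
      · rintro ⟨b, hb, hjb⟩
        exact ⟨(j : Int), List.mem_flatMap.mpr ⟨b, hb, hjb⟩, rfl⟩
    by_cases hcj : c (j : Int)
    · rw [if_pos ⟨hmem, hcj⟩, if_pos (hEx.mpr hcj)]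
    · rw [if_neg (by rintro ⟨-, h⟩; exact hcj h), if_neg (fun h => hcj (hEx.mp h))]
      rw [List.getElem?_replicate, List.getElem?_replicate]
      simp only [if_pos hjN', if_pos (show j < (2*N).toNat by omega)]
  · have hnoEx : ¬ (∃ i ∈ (PySem.List.pyRange S N (2 * (2 * px * px))).flatMap
          (fun base => PySem.List.pyRange (base + o) (min (base + 2 * px * px) N) (2 * px)),
        i = (j : Int)) := by
      rintro ⟨i, hi, rfl⟩
      rw [List.mem_flatMap] at hi
      obtain ⟨b, hb, hib⟩ := hi
      rw [PySem.List.mem_pyRange_iff_of_pos hM] at hb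
      rw [PySem.List.mem_pyRange_iff_of_pos h2px] at hib
      have := min_le_right (b + 2 * px * px) N
      omega
    rw [if_neg hnoEx]
    rw [List.getElem?_append_right (by omega : (pvCondFold c (PySem.List.pyRange 0 N 1) (List.replicate N.toNat 0)).length ≤ j), hlen]
    rw [List.getElem?_replicate, List.getElem?_replicate]
    by_cases hj2 : (j : Int) < 2 * N
    · simp only [if_pos (show j - N.toNat < N.toNat by omega),
        if_pos (show j < (2*N).toNat by omega)]
    · simp only [if_neg (show ¬ j - N.toNat < N.toNat by omega),
        if_neg (show ¬ j < (2*N).toNat by omega)]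
theorem pvAssemble (zeros l1 l2 l3 l4 l5 l6 l7 l8 : List Int) :
    (([l1, l2, l3, l4, l5, l6, l7, l8] : List (List Int)).foldl
      (fun (st : List (List Int) × Int) logical =>
        let newl := if st.2 < 4 then zeros ++ logical else logical ++ zeros
        (st.1 ++ [newl], st.2 + 1))
      ([], 0)).1 =
      [zeros ++ l1, zeros ++ l2, zeros ++ l3, zeros ++ l4,
       l5 ++ zeros, l6 ++ zeros, l7 ++ zeros, l8 ++ zeros] := by
  norm_num [List.foldl]

theorem pv_main (px N : Int) (hpx : 1 ≤ px) (hN : 0 < N) :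
    chamon_full_logicals px N = chamon_full_logicals_alt px N := by
  have h2px : (0:Int) < 2 * px := by omega
  have hnl : (0:Int) < 2 * px * px := by nlinarith
  have hM : (0:Int) < 2 * (2 * px * px) := by nlinarith
  have hm0 : ∀ i : Int, 0 ≤ i % (2 * px) := fun i => Int.emod_nonneg i (by omega)
  have hm2 : ∀ i : Int, i % (2 * px) < 2 * px := fun i => Int.emod_lt_of_pos i h2px
  have hL0 : ∀ i : Int, 0 ≤ i % (2 * (2 * px * px)) := fun i => Int.emod_nonneg i (by omega)
  have hL2 : ∀ i : Int, i % (2 * (2 * px * px)) < 2 * (2 * px * px) :=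
    fun i => Int.emod_lt_of_pos i hM
  have hmod2 : ∀ a : Int, PySem.Int.mod a 2 = 0 ∨ PySem.Int.mod a 2 = 1 := fun a => by
    have h1 := PySem.Int.mod_nonneg a (show (0:Int) < 2 by norm_num)
    have h2 := PySem.Int.mod_lt a (show (0:Int) < 2 by norm_num)
    omega
  have hme : ∀ i : Int, PySem.Int.mod i (2 * px) = i % (2 * px) :=
    fun i => PySem.Int.mod_eq_emod_of_pos h2px
  -- condition bridges
  have hcz1 : ∀ i : Int, 0 ≤ i → i < N → (pvCz1 px (2 * px * px) i ↔
      ((0:Int) ≤ i ∧ i < 0 + 2 * px * px ∧ (0:Int) ≤ i % (2 * px) ∧ i % (2 * px) < 0 + px)) := by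
    intro i h0 h1
    rw [pvCz1, (pv_parity_iff px i (by omega)).1]
    constructor
    · rintro ⟨a, b⟩; exact ⟨h0, by linarith, hm0 i, by linarith⟩
    · rintro ⟨-, a, -, b⟩; exact ⟨by linarith, by linarith⟩
  have hcz2 : ∀ i : Int, 0 ≤ i → i < N → (pvCz2 px (2 * px * px) i ↔
      ((0:Int) ≤ i ∧ i < 0 + 2 * px * px ∧ px ≤ i % (2 * px) ∧ i % (2 * px) < px + px)) := by
    intro i h0 h1
    have e := pv_parity_iff px i (by omega)
    rw [pvCz2]
    constructor
    · rintro ⟨a, b⟩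
      have h1' : PySem.Int.mod (PySem.Int.floordiv i px) 2 = 1 := by
        rcases hmod2 (PySem.Int.floordiv i px) with h | h
        · exact absurd h b
        · exact h
      exact ⟨h0, by linarith, e.2.mp h1', by linarith [hm2 i]⟩
    · rintro ⟨-, a, hb, -⟩
      exact ⟨by linarith, fun hh => by have := e.1.mp hh; linarith⟩
  have hcz3 : ∀ i : Int, 0 ≤ i → i < N → (pvCz3 px (2 * px * px) i ↔
      (2 * px * px ≤ i ∧ i < 2 * px * px + 2 * px * px ∧
        (0:Int) ≤ i % (2 * px) ∧ i % (2 * px) < 0 + px)) := by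
    intro i h0 h1
    rw [pvCz3, (pv_parity_iff px i (by omega)).1]
    constructor
    · rintro ⟨a, b, c'⟩; exact ⟨by linarith, by linarith, hm0 i, by linarith⟩
    · rintro ⟨a, b, -, c'⟩; exact ⟨by linarith, by linarith, by linarith⟩
  have hcz4 : ∀ i : Int, 0 ≤ i → i < N → (pvCz4 px (2 * px * px) i ↔
      (2 * px * px ≤ i ∧ i < 2 * px * px + 2 * px * px ∧
        px ≤ i % (2 * px) ∧ i % (2 * px) < px + px)) := by
    intro i h0 h1
    have e := pv_parity_iff px i (by omega)
    rw [pvCz4]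
    constructor
    · rintro ⟨a, b, c'⟩
      have h1' : PySem.Int.mod (PySem.Int.floordiv i px) 2 = 1 := by
        rcases hmod2 (PySem.Int.floordiv i px) with h | h
        · exact absurd h c'
        · exact h
      exact ⟨by linarith, by linarith, e.2.mp h1', by linarith [hm2 i]⟩
    · rintro ⟨a, b, hb, -⟩
      exact ⟨by linarith, by linarith, fun hh => by have := e.1.mp hh; linarith⟩
  have hcx1 : ∀ i : Int, 0 ≤ i → i < N → (pvCx1 px (2 * px * px) i ↔
      (i % (2 * px) = 0 ∧ (0:Int) ≤ i % (2 * (2 * px * px)) ∧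
        i % (2 * (2 * px * px)) < 0 + 2 * px * px)) := by
    intro i h0 h1
    rw [pvCx1, hme i, (pv_parity_iff (2 * px * px) i hnl).1]
    constructor
    · rintro ⟨a, b⟩; exact ⟨a, hL0 i, by linarith⟩
    · rintro ⟨a, -, b⟩; exact ⟨a, by linarith⟩
  have hcx2 : ∀ i : Int, 0 ≤ i → i < N → (pvCx2 px (2 * px * px) i ↔
      (i % (2 * px) = 0 ∧ 2 * px * px ≤ i % (2 * (2 * px * px)) ∧
        i % (2 * (2 * px * px)) < 2 * px * px + 2 * px * px)) := by
    intro i h0 h1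
    have e := pv_parity_iff (2 * px * px) i hnl
    rw [pvCx2, pvCx1, hme i]
    constructor
    · rintro ⟨-, a, b⟩
      exact ⟨a, e.2.mp b, by linarith [hL2 i]⟩
    · rintro ⟨a, b, -⟩
      have h1' : PySem.Int.mod (PySem.Int.floordiv i (2 * px * px)) 2 = 1 := by
        rcases hmod2 (PySem.Int.floordiv i (2 * px * px)) with h | h
        · have := e.1.mp h; linarith
        · exact h
      refine ⟨fun hh => ?_, a, h1'⟩
      have := e.1.mp hh.2; linarith
  have hcx3 : ∀ i : Int, 0 ≤ i → i < N → (pvCx3 px (2 * px * px) i ↔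
      (i % (2 * px) = px ∧ (0:Int) ≤ i % (2 * (2 * px * px)) ∧
        i % (2 * (2 * px * px)) < 0 + 2 * px * px)) := by
    intro i h0 h1
    have e := pv_parity_iff (2 * px * px) i hnl
    rw [pvCx3, pvCx1, hme i]
    constructor
    · rintro ⟨-, -, a, b⟩
      exact ⟨a, hL0 i, by linarith [e.1.mp b]⟩
    · rintro ⟨a, -, b⟩
      have hpar0 : PySem.Int.mod (PySem.Int.floordiv i (2 * px * px)) 2 = 0 := e.1.mpr (by linarith)
      exact ⟨fun hh => by omega, fun hh => by omega, a, hpar0⟩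
  have hcx4 : ∀ i : Int, 0 ≤ i → i < N → (pvCx4 px (2 * px * px) i ↔
      (i % (2 * px) = px ∧ 2 * px * px ≤ i % (2 * (2 * px * px)) ∧
        i % (2 * (2 * px * px)) < 2 * px * px + 2 * px * px)) := by
    intro i h0 h1
    have e := pv_parity_iff (2 * px * px) i hnl
    rw [pvCx4, pvCx1, hme i]
    constructor
    · rintro ⟨-, -, -, a, b⟩
      exact ⟨a, e.2.mp b, by linarith [hL2 i]⟩
    · rintro ⟨a, b, -⟩
      have h1' : PySem.Int.mod (PySem.Int.floordiv i (2 * px * px)) 2 = 1 := by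
        rcases hmod2 (PySem.Int.floordiv i (2 * px * px)) with h | h
        · have := e.1.mp h; linarith
        · exact h
      exact ⟨fun hh => by omega, fun hh => by omega, fun hh => by omega, a, h1'⟩
  -- unfold A
  rw [chamon_full_logicals, chamon_logicals]
  rw [PySem.List.pyRepeat_singleton, pvFoldA_split]
  rw [pvAssemble]
  -- unfold B
  rw [chamon_full_logicals_alt]
  rw [show (if N > 0 then N else 0) = N from if_pos hN]
  rw [if_neg (by omega : ¬ N = 0)]
  refine List.cons_eq_cons.mpr ⟨?_, List.cons_eq_cons.mpr ⟨?_, List.cons_eq_cons.mpr ⟨?_,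
    List.cons_eq_cons.mpr ⟨?_, List.cons_eq_cons.mpr ⟨?_, List.cons_eq_cons.mpr ⟨?_,
    List.cons_eq_cons.mpr ⟨?_, List.cons_eq_cons.mpr ⟨?_, rfl⟩⟩⟩⟩⟩⟩⟩⟩
  · exact pvZcomp px N 0 0 hpx hN (Or.inl rfl) (Or.inl rfl) _ hcz1 _ _ (by ring) (by ring)
  · exact pvZcomp px N 0 px hpx hN (Or.inl rfl) (Or.inr rfl) _ hcz2 _ _ (by ring) (by ring)
  · exact pvZcomp px N (2*px*px) 0 hpx hN (Or.inr rfl) (Or.inl rfl) _ hcz3 _ _ (by ring) (by ring)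
  · exact pvZcomp px N (2*px*px) px hpx hN (Or.inr rfl) (Or.inr rfl) _ hcz4 _ _ (by ring) (by ring)
  · exact pvXcomp px N 0 0 hpx hN (Or.inl rfl) (Or.inl rfl) _ hcx1
  · exact pvXcomp px N (2*px*px) 0 hpx hN (Or.inr rfl) (Or.inl rfl) _ hcx2
  · exact pvXcomp px N 0 px hpx hN (Or.inl rfl) (Or.inr rfl) _ hcx3
  · exact pvXcomp px N (2*px*px) px hpx hN (Or.inr rfl) (Or.inr rfl) _ hcx4
theorem pv_trivial (px N : Int) (hN : N ≤ 0) :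
    chamon_full_logicals px N = chamon_full_logicals_alt px N := by
  have h1 : PySem.List.pyRange 0 N 1 = [] := PySem.List.pyRange_one_eq_nil (by omega)
  have h2 : PySem.List.pyRepeat ([0] : List Int) N = [] := by
    rw [PySem.List.pyRepeat_singleton, Int.toNat_of_nonpos hN, List.replicate_zero]
  rw [chamon_full_logicals, chamon_logicals, h1, h2]
  rw [chamon_full_logicals_alt]
  rw [show (if N > 0 then N else 0) = 0 from if_neg (by omega)]
  norm_num [List.foldl]

-- ===== VERDICT (by name: the statement is the Claim_ definition above) =====
theorem chamon_full_logicals_spec : Claim_equal_chamon_full_logicals := by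
  intro px N _ hpre
  unfold Spec_chamon_full_logicals
  by_cases hN : N ≤ 0
  · exact pv_trivial px N hN
  · exact pv_main px N (hpre.resolve_right hN) (by omega)
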